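-- pv_equiv track=rewrite | github.com/sahitikota/TJHSST-Artifical-Intelligence | Sliding Puzzles 1/SlidingPuzzles1_SahitiKota.py | printPuzzle
-- ===== SOURCE A (Python) =====
-- def printPuzzle(size, stringRepresentation):
--     toPrint = ""
--     for index in range (0, len(stringRepresentation)):
--         if index % size != 0:
--             toPrint += stringRepresentation[index] + " "
--         elif index % size == 0:
--             toPrint += '\n'
--             toPrint += stringRepresentation[index] + " "
--     return toPrint
-- ===== SOURCE B (Python) =====
-- def printPuzzle(size, stringRepresentation):
--     rows = []
--     rest = stringRepresentation
--     while rest: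
--         rows.append('\n' + ''.join(cell + ' ' for cell in rest[:size]))
--         rest = rest[size:]
--     return ''.join(rows)
-- ===== Notes on version B (the rewrite author's own statement) =====
-- stated objective: simpler
-- what changed: B slices the input into rows of size cells and emits one row string per loop step, replacing A's per-index modulo test with grouped row-by-row chunking; Pre_ keeps the natural domain size >= 1 (or empty input), excluding size = 0 where A raises ZeroDivisionError and negative sizes, outside a puzzle's natural domain, where A's output comes from accidental modulo arithmetic and B's loop does not terminate.
-- outside the precondition, e.g. on printPuzzle(-2, ['a', 'b', 'c']): A returns '\na b \nc ', B does not finish within the time limit; on printPuzzle(0, ['a']): A raises ZeroDivisionError, B does not finish within the time limit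
import Mathlib
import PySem

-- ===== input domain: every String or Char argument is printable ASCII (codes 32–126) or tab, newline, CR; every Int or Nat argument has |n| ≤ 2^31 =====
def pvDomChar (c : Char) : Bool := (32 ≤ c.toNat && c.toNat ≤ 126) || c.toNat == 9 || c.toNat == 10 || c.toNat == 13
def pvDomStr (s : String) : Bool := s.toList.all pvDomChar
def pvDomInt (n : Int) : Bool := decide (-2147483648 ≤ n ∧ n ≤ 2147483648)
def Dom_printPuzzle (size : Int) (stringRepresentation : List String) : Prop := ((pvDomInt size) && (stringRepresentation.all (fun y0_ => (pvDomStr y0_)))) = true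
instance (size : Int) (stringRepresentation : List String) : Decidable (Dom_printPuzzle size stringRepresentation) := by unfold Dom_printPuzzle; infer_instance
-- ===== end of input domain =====

-- B formats the puzzle row by row (slice off a chunk of `size` cells per loop step) instead of
-- A's per-index modulo test; objective: simpler. Pre_ keeps the natural domain size ≥ 1 (or an
-- empty list): at size = 0 with a nonempty list A raises ZeroDivisionError, and for negative
-- sizes (outside a puzzle's natural domain) B's loop does not terminate.


-- ===== PORT A =====
def printPuzzle (size : Int) (stringRepresentation : List String) : String :=
  (PySem.List.pyRange 0 (PySem.List.len stringRepresentation) 1).foldl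
    (fun toPrint index =>
      if PySem.Int.mod index size ≠ 0 then
        toPrint ++ (PySem.List.pyGetD stringRepresentation index "" ++ " ")
      else if PySem.Int.mod index size = 0 then
        (toPrint ++ "\n") ++ (PySem.List.pyGetD stringRepresentation index "" ++ " ")
      else toPrint) ""

-- ===== PORT B =====
-- the 'while rest:' loop of Source B, ported with fuel (one unit per iteration; rest shrinks each time)
def pvAltLoop (size : Int) : Nat → List String → List String → List String
  | 0, rows, _ => rows
  | fuel + 1, rows, rest =>
    match rest with
    | [] => rows
    | _ :: _ =>
      pvAltLoop size fuel
        (rows ++ ["\n" ++ PySem.Str.join "" ((PySem.List.slice rest none (some size)).map (fun cell => cell ++ " "))])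
        (PySem.List.slice rest (some size) none)

def printPuzzle_alt (size : Int) (stringRepresentation : List String) : String :=
  PySem.Str.join "" (pvAltLoop size stringRepresentation.length [] stringRepresentation)

-- ===== PRECONDITION & SPEC =====
-- Pre_ keeps the natural domain: size ≥ 1, or an empty list (where both return "" for any size).
-- It excludes size = 0 with a nonempty list (A raises ZeroDivisionError) and negative sizes with a
-- nonempty list, where A's rows-of-|size| output is an accident of modulo arithmetic and B's
-- slicing loop does not terminate.
def Pre_printPuzzle (size : Int) (stringRepresentation : List String) : Prop :=
  1 ≤ size ∨ stringRepresentation = []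
instance (size : Int) (stringRepresentation : List String) : Decidable (Pre_printPuzzle size stringRepresentation) := by unfold Pre_printPuzzle; infer_instance
def pvWitness_printPuzzle : Int × List String := (2, ["a", "b", "c"])

def Spec_printPuzzle (size : Int) (stringRepresentation : List String) (out : String) : Prop := out = printPuzzle_alt size stringRepresentation
instance (size : Int) (stringRepresentation : List String) (out : String) : Decidable (Spec_printPuzzle size stringRepresentation out) := by unfold Spec_printPuzzle; infer_instance

-- ===== CLAIM (what is proved, stated in full; the proofs are below) =====
def Claim_equal_printPuzzle : Prop := ∀ (size : Int) (stringRepresentation : List String), Dom_printPuzzle size stringRepresentation → Pre_printPuzzle size stringRepresentation → Spec_printPuzzle size stringRepresentation (printPuzzle size stringRepresentation)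

-- ===== LEMMAS AND PROOFS =====

-- a row as B builds it
def pvRow (c : List String) : String := "\n" ++ PySem.Str.join "" (c.map (fun cell => cell ++ " "))

-- A's loop as a structural recursion over the list with a running index (n = size.natAbs)
def pvGoA (n : Nat) : List String → Nat → String → String
  | [], _, acc => acc
  | x :: t, j, acc => pvGoA n t (j + 1) (if n ∣ j then (acc ++ "\n") ++ (x ++ " ") else acc ++ (x ++ " "))

theorem pvJoinCons (p : String) (ps : List String) :
    PySem.Str.join "" (p :: ps) = p ++ PySem.Str.join "" ps := by
  induction ps with
  | nil => simp [PySem.Str.join, PySem.Chars.join, List.intercalate]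
  | cons q qs ih => simp_all [PySem.Str.join, PySem.Chars.join, List.intercalate, String.ofList_append]

theorem pvJoinNil : PySem.Str.join "" ([] : List String) = "" := rfl

theorem pvAltLoop_nil (size : Int) (fuel : Nat) (rows : List String) :
    pvAltLoop size fuel rows [] = rows := by
  cases fuel <;> rfl

theorem pvAltLoop_acc (size : Int) (fuel : Nat) (rows rest : List String) :
    pvAltLoop size fuel rows rest = rows ++ pvAltLoop size fuel [] rest := by
  induction fuel generalizing rows rest with
  | zero => simp [pvAltLoop]
  | succ f ih =>
    cases rest with
    | nil => simp [pvAltLoop]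
    | cons x t =>
      rw [pvAltLoop, pvAltLoop]
      simp only [List.nil_append]
      rw [ih (rows := rows ++ [_]), ih (rows := [_])]
      simp

theorem pvFoldA (size : Int) (pre l : List String) (acc : String) :
    (PySem.List.pyRange (pre.length : Int) (((pre ++ l).length : Int)) 1).foldl
      (fun toPrint index =>
        if PySem.Int.mod index size ≠ 0 then
          toPrint ++ (PySem.List.pyGetD (pre ++ l) index "" ++ " ")
        else if PySem.Int.mod index size = 0 then
          (toPrint ++ "\n") ++ (PySem.List.pyGetD (pre ++ l) index "" ++ " ")
        else toPrint) acc
    = pvGoA size.natAbs l pre.length acc := by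
  induction l generalizing pre acc with
  | nil =>
    rw [PySem.List.pyRange_one_eq_nil (by simp)]
    rfl
  | cons x t ih =>
    rw [PySem.List.pyRange_one_cons (by push_cast [List.length_append, List.length_cons]; omega)]
    have hget : PySem.List.pyGetD (pre ++ x :: t) (pre.length : Int) "" = x := by
      rw [PySem.List.pyGetD_natCast]
      simp [List.getD]
    have hmod : (PySem.Int.mod (pre.length : Int) size = 0) ↔ size.natAbs ∣ pre.length := by
      rw [PySem.Int.mod_eq_zero_iff_dvd]
      rw [← Int.natAbs_dvd]
      exact_mod_cast Int.natCast_dvd_natCast.symm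
    have hstep : ∀ a : String,
        (if PySem.Int.mod (pre.length : Int) size ≠ 0 then
          a ++ (PySem.List.pyGetD (pre ++ x :: t) (pre.length : Int) "" ++ " ")
        else if PySem.Int.mod (pre.length : Int) size = 0 then
          (a ++ "\n") ++ (PySem.List.pyGetD (pre ++ x :: t) (pre.length : Int) "" ++ " ")
        else a)
        = (if size.natAbs ∣ pre.length then (a ++ "\n") ++ (x ++ " ") else a ++ (x ++ " ")) := by
      intro a
      rw [hget]
      by_cases h : PySem.Int.mod (pre.length : Int) size = 0
      · simp [h, hmod.mp h]
      · have hnd : ¬ size.natAbs ∣ pre.length := fun hd => h (hmod.mpr hd)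
        simp [h, hnd]
    have hre : pre ++ x :: t = (pre ++ [x]) ++ t := by simp
    rw [List.foldl_cons, hstep]
    have := ih (pre := pre ++ [x])
      (acc := if size.natAbs ∣ pre.length then (acc ++ "\n") ++ (x ++ " ") else acc ++ (x ++ " "))
    simp only [List.length_append, List.length_cons, List.length_nil, Nat.zero_add] at this ⊢
    rw [hre]
    rw [show ((pre.length : Int) + 1) = ((pre.length + 1 : Nat) : Int) by push_cast; ring]
    rw [show pre.length + (t.length + 1) = pre.length + 1 + t.length by omega]
    rw [this]
    rfl

theorem pvGoA_nondiv (n : Nat) (c r : List String) (j : Nat) (acc : String)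
    (h : ∀ m, m < c.length → ¬ n ∣ (j + m)) :
    pvGoA n (c ++ r) j acc
      = pvGoA n r (j + c.length) (acc ++ PySem.Str.join "" (c.map (fun cell => cell ++ " "))) := by
  induction c generalizing j acc with
  | nil => simp [pvJoinNil, String.append_empty]
  | cons x c' ih =>
    have h0 : ¬ n ∣ j := by simpa using h 0 (by simp)
    rw [List.cons_append, pvGoA, if_neg h0]
    rw [ih (j := j + 1) (h := fun m hm => by
      have := h (m + 1) (by simp; omega)
      rwa [show j + 1 + m = j + (m + 1) by omega])]
    rw [List.map_cons, pvJoinCons]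
    rw [show j + 1 + c'.length = j + (c'.length + 1) by omega]
    rw [String.append_assoc]
    simp

theorem pvGoA_chunk (n : Nat) (x : String) (c' r : List String) (j : Nat) (acc : String)
    (hd : n ∣ j) (hlen : (x :: c').length ≤ n) :
    pvGoA n ((x :: c') ++ r) j acc
      = pvGoA n r (j + (x :: c').length) (acc ++ pvRow (x :: c')) := by
  rw [List.cons_append, pvGoA, if_pos hd]
  rw [pvGoA_nondiv (h := fun m hm hdvd => by
    have h1 : n ∣ (m + 1) := by
      have : j + 1 + m = j + (m + 1) := by omega
      rw [this] at hdvd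
      exact (Nat.dvd_add_right hd).mp hdvd
    have := Nat.le_of_dvd (by omega) h1
    simp at hlen hm
    omega)]
  rw [show j + 1 + c'.length = j + (c'.length + 1) by omega]
  rw [pvRow, List.map_cons, pvJoinCons]
  simp [String.append_assoc]

theorem pvMain (n : Nat) (hn : 0 < n) (fuel : Nat) (l : List String) (j : Nat) (acc : String)
    (hf : l.length ≤ fuel) (hd : n ∣ j) :
    pvGoA n l j acc = acc ++ PySem.Str.join "" (pvAltLoop (n : Int) fuel [] l) := by
  induction fuel generalizing l j acc with
  | zero =>
    have : l = [] := by simpa using List.length_eq_zero_iff.mp (Nat.le_zero.mp hf)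
    subst this
    simp [pvAltLoop, pvGoA, pvJoinNil, String.append_empty]
  | succ f ih =>
    cases l with
    | nil => simp [pvAltLoop, pvGoA, pvJoinNil, String.append_empty]
    | cons x t =>
      have hslice_take : PySem.List.slice (x :: t) none (some (n : Int)) = (x :: t).take n :=
        PySem.List.slice_to_natCast (x :: t) n
      have hslice_drop : PySem.List.slice (x :: t) (some (n : Int)) none = (x :: t).drop n :=
        PySem.List.slice_from_natCast (x :: t) n
      rw [pvAltLoop, hslice_take, hslice_drop, pvAltLoop_acc]
      simp only [List.nil_append, List.cons_append]
      rw [pvJoinCons]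
      have hchunk : ∃ c', (x :: t).take n = x :: c' := by
        cases n with
        | zero => omega
        | succ m => exact ⟨t.take m, by simp⟩
      obtain ⟨c', hc'⟩ := hchunk
      have hsplit : x :: t = ((x :: t).take n) ++ ((x :: t).drop n) := (List.take_append_drop _ _).symm
      have hlen_take : ((x :: t).take n).length ≤ n := by simp
      conv_lhs => rw [hsplit, hc']
      rw [pvGoA_chunk n x c' _ j acc hd (by rw [← hc']; exact hlen_take)]
      rw [← hc']
      by_cases hle : (x :: t).length ≤ n
      · have hdrop : (x :: t).drop n = [] := List.drop_eq_nil_of_le hle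
        rw [hdrop, pvAltLoop_nil, pvGoA]
        simp [pvRow, pvJoinNil, String.append_empty, List.take_of_length_le hle]
      · have hlen_eq : ((x :: t).take n).length = n := by
          simp only [List.length_take, List.length_cons] at hle ⊢; omega
        rw [ih ((x :: t).drop n) (j + ((x :: t).take n).length) _
          (by simp only [List.length_drop, List.length_cons] at hf ⊢; omega)
          (by rw [hlen_eq]; exact Nat.dvd_add hd dvd_rfl)]
        simp [pvRow, String.append_assoc]

-- ===== VERDICT (by name: the statement is the Claim_ definition above) =====
theorem printPuzzle_spec : Claim_equal_printPuzzle := by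
  intro size s _ hpre
  unfold Spec_printPuzzle printPuzzle_alt
  cases s with
  | nil =>
    rfl
  | cons x t =>
    have hsize : 1 ≤ size := by
      rcases hpre with h | h
      · exact h
      · simp at h
    have hn : 0 < size.natAbs := Int.natAbs_pos.mpr (by omega)
    have hA : printPuzzle size (x :: t) = pvGoA size.natAbs (x :: t) 0 "" := by
      have := pvFoldA size [] (x :: t) ""
      simpa [printPuzzle] using this
    rw [hA]
    conv_rhs => rw [show size = ((size.natAbs : Nat) : Int) by omega]
    rw [pvMain size.natAbs hn (x :: t).length (x :: t) 0 "" le_rfl (Nat.dvd_zero _)]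
    exact String.empty_append
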